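-- pv_equiv track=rewrite | github.com/vorobvla/Semestralka-z-BI-PYT-brainx- | brainx/graphics/png_processor.py | get_image_matrix
-- ===== SOURCE A (Python) =====
-- def get_image_matrix(data, w, h):
--     act_h = 0
--     img_matrix = []
--     idx = 0
--     while act_h < h:
--         act_h += 1
--         act_w = 0
--         row = []
--         while act_w < w:
--             act_w += 1
--             row.append((data[idx], data[idx + 1], data[idx + 2]))
--             idx += 3
--         img_matrix.append(row)
--
--     return img_matrix
-- ===== SOURCE B (Python) =====
-- def get_image_matrix(data, w, h):
--     pixels = [(data[i], data[i + 1], data[i + 2]) for i in range(0, 3 * w * h, 3)]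
--     return [pixels[r * w:(r + 1) * w] for r in range(h)]
-- ===== Notes on version B (the rewrite author's own statement) =====
-- stated objective: simpler
-- what changed: A's nested index-advancing while loops are replaced by a build-then-chunk decomposition: one flat comprehension builds all pixel triples, then the matrix is formed by slicing that flat list into rows; Pre_ excludes inputs with w*h > 0 but fewer than 3*w*h data values, where A raises IndexError for positive w,h, and where for doubly-negative dimensions (outside the natural domain) A returns [] while B's flat pass raises IndexError.
-- outside the precondition, e.g. on get_image_matrix([], -1, -1): A returns [], B raises IndexError
import Mathlib
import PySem

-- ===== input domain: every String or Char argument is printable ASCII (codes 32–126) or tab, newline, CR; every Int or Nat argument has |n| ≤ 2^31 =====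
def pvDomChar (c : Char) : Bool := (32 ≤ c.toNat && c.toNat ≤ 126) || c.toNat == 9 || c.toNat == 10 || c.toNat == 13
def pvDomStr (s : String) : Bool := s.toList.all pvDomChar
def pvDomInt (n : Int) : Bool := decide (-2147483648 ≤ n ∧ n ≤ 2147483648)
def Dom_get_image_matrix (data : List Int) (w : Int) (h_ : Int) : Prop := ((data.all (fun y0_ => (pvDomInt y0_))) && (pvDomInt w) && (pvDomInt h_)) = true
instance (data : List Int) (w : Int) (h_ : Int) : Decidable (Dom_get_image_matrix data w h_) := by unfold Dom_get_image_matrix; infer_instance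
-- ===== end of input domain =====

-- B replaces A's nested index-advancing while loops by a build-then-chunk decomposition:
-- one flat pass building all pixels, then reshaping into rows by slicing (objective: simpler).

-- ===== PORT A =====
-- inner 'while act_w < w' loop: runs w.toNat times, consuming 3 data entries per pixel
def pvRowA (data : List Int) : Nat → Int → List (Int × Int × Int)
  | 0, _ => []
  | n + 1, idx =>
      (PySem.List.pyGetD data idx 0, PySem.List.pyGetD data (idx + 1) 0,
        PySem.List.pyGetD data (idx + 2) 0) :: pvRowA data n (idx + 3)

-- outer 'while act_h < h' loop: after each row, idx has advanced by 3*w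
def pvMatA (data : List Int) (w : Int) : Nat → Int → List (List (Int × Int × Int))
  | 0, _ => []
  | m + 1, idx => pvRowA data w.toNat idx :: pvMatA data w m (idx + 3 * (w.toNat : Int))

def get_image_matrix (data : List Int) (w : Int) (h_ : Int) : List (List (Int × Int × Int)) :=
  pvMatA data w h_.toNat 0

-- ===== PORT B =====
-- pixels = [(data[i], data[i+1], data[i+2]) for i in range(0, 3*w*h, 3)]
def pvPixels (data : List Int) (w : Int) (h_ : Int) : List (Int × Int × Int) :=
  (PySem.List.pyRange 0 (3 * (w * h_)) 3).map
    (fun i => (PySem.List.pyGetD data i 0, PySem.List.pyGetD data (i + 1) 0,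
      PySem.List.pyGetD data (i + 2) 0))

def get_image_matrix_alt (data : List Int) (w : Int) (h_ : Int) : List (List (Int × Int × Int)) :=
  (PySem.List.pyRange 0 h_ 1).map
    (fun r => PySem.List.slice (pvPixels data w h_) (some (r * w)) (some ((r + 1) * w)))

-- ===== PRECONDITION & SPEC =====
-- Pre_ excludes inputs with w*h > 0 but fewer than 3*w*h data values: for positive w,h A raises
-- IndexError there, and the doubly-negative dimensions lie outside the natural domain of the
-- function (A returns [] there, while B's flat pixel pass raises IndexError).
def Pre_get_image_matrix (data : List Int) (w : Int) (h_ : Int) : Prop :=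
  0 < w * h_ → 3 * (w * h_) ≤ (data.length : Int)
instance (data : List Int) (w : Int) (h_ : Int) : Decidable (Pre_get_image_matrix data w h_) := by
  unfold Pre_get_image_matrix; infer_instance

def pvWitness_get_image_matrix : List Int × Int × Int := ([10, 20, 30, 40, 50, 60], 2, 1)

def Spec_get_image_matrix (data : List Int) (w : Int) (h_ : Int) (out : List (List (Int × Int × Int))) : Prop := out = get_image_matrix_alt data w h_
instance (data : List Int) (w : Int) (h_ : Int) (out : List (List (Int × Int × Int))) : Decidable (Spec_get_image_matrix data w h_ out) := by unfold Spec_get_image_matrix; infer_instance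

-- ===== CLAIM (what is proved, stated in full; the proofs are below) =====
def Claim_equal_get_image_matrix : Prop := ∀ (data : List Int) (w : Int) (h_ : Int), Dom_get_image_matrix data w h_ → Pre_get_image_matrix data w h_ → Spec_get_image_matrix data w h_ (get_image_matrix data w h_)

-- ===== LEMMAS AND PROOFS =====

-- the pixel triple starting at index i
def pvT (data : List Int) (i : Int) : Int × Int × Int :=
  (PySem.List.pyGetD data i 0, PySem.List.pyGetD data (i + 1) 0, PySem.List.pyGetD data (i + 2) 0)

lemma rowA_eq (data : List Int) : ∀ (n : Nat) (idx : Int),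
    pvRowA data n idx = (List.range n).map (fun (c : Nat) => pvT data (idx + 3 * (c : Int)))
  | 0, _ => by simp [pvRowA]
  | n + 1, idx => by
      rw [pvRowA, rowA_eq data n (idx + 3), List.range_succ_eq_map, List.map_cons, List.map_map]
      congr 1
      · simp [pvT]
      · apply List.map_congr_left
        intro a _
        simp only [Function.comp, Nat.succ_eq_add_one]
        congr 1 <;> · push_cast; ring

lemma matA_eq (data : List Int) (w : Int) : ∀ (m : Nat) (idx : Int),
    pvMatA data w m idx =
      (List.range m).map (fun (r : Nat) => pvRowA data w.toNat (idx + 3 * (w.toNat : Int) * (r : Int)))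
  | 0, _ => by simp [pvMatA]
  | m + 1, idx => by
      rw [pvMatA, matA_eq data w m (idx + 3 * (w.toNat : Int)), List.range_succ_eq_map,
        List.map_cons, List.map_map]
      congr 1
      · simp
      · apply List.map_congr_left
        intro a _
        simp only [Function.comp, Nat.succ_eq_add_one]
        congr 1 <;> · push_cast; ring

lemma slice_nil {α : Type} (a b : Int) : PySem.List.slice ([] : List α) (some a) (some b) = [] := by
  have h := PySem.List.length_slice ([] : List α) a b
  cases hs : PySem.List.slice ([] : List α) (some a) (some b) with
  | nil => rfl
  | cons x xs =>
      exfalso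
      rw [hs] at h
      have h1 : PySem.List.clampIdx ([] : List α).length b ≤ ([] : List α).length :=
        PySem.List.clampIdx_le _ _
      simp only [List.length_nil, Nat.le_zero] at h1
      simp only [List.length_nil, h1] at h
      simp only [List.length_cons] at h
      omega

theorem get_image_matrix_spec_aux (data : List Int) (w : Int) (h_ : Int)
    (hpre : Pre_get_image_matrix data w h_) :
    get_image_matrix data w h_ = get_image_matrix_alt data w h_ := by
  unfold get_image_matrix get_image_matrix_alt pvPixels
  by_cases hh : h_ ≤ 0
  · -- h_ ≤ 0 : both sides are empty
    rw [PySem.List.pyRange_one_eq_nil hh]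
    have : h_.toNat = 0 := Int.toNat_of_nonpos hh
    simp [this, pvMatA]
  · have hh : 0 < h_ := by omega
    by_cases hw : w ≤ 0
    · -- 0 < h_, w ≤ 0 : h_ rows, all empty
      have hw0 : w.toNat = 0 := Int.toNat_of_nonpos hw
      have hpix : PySem.List.pyRange 0 (3 * (w * h_)) 3 = [] := by
        rw [PySem.List.pyRange_of_pos 0 (3 * (w * h_)) (by norm_num)]
        rw [if_neg (by nlinarith)]
        simp
      rw [hpix]
      simp only [List.map_nil]
      rw [matA_eq, hw0]
      simp only [pvRowA]
      rw [PySem.List.pyRange_one]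
      simp only [List.map_map, Int.sub_zero]
      apply List.map_congr_left
      intro a _
      simp [slice_nil]
    · have hw : 0 < w := by omega
      -- main case : 0 < w, 0 < h_
      have hlen : 3 * (w * h_) ≤ (data.length : Int) := hpre (by positivity)
      set W := w.toNat with hW
      set H := h_.toNat with hH
      have hwW : (W : Int) = w := Int.toNat_of_nonneg hw.le
      have hhH : (H : Int) = h_ := Int.toNat_of_nonneg hh.le
      -- the flat pixel list is a map over range (W*H)
      have hcount : ((3 * (w * h_) - 0 + 3 - 1) / 3).toNat = W * H := by
        have he : 3 * (w * h_) - 0 + 3 - 1 = 3 * ((W * H : Nat) : Int) + 2 := by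
          rw [← hwW, ← hhH]; push_cast; ring
        rw [he]
        omega
      have hpix : PySem.List.pyRange 0 (3 * (w * h_)) 3 =
          (List.range (W * H)).map (fun k => ((3 * k : Nat) : Int)) := by
        rw [PySem.List.pyRange_of_pos 0 (3 * (w * h_)) (by norm_num)]
        rw [if_pos (by positivity), hcount]
        apply List.map_congr_left
        intro k _
        push_cast
        ring
      rw [hpix, List.map_map]
      rw [matA_eq, PySem.List.pyRange_one]
      simp only [List.map_map, Int.sub_zero, hH.symm]
      apply List.map_congr_left
      intro r hr
      rw [List.mem_range] at hr
      simp only [Function.comp]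
      -- left row
      rw [rowA_eq]
      -- right row : slice of the flat map
      have hb0 : (0 : Int) ≤ (0 + (r : Int)) * w := by positivity
      have hb1 : (0 : Int) ≤ (0 + (r : Int) + 1) * w := by positivity
      rw [PySem.List.slice_toNat _ hb0 hb1]
      have ht0' : (0 + (r : Int)) * w = ((r * W : Nat) : Int) := by
        rw [← hwW]; push_cast; ring
      have ht1' : (0 + (r : Int) + 1) * w = (((r + 1) * W : Nat) : Int) := by
        rw [← hwW]; push_cast; ring
      have ht0 : ((0 + (r : Int)) * w).toNat = r * W := by rw [ht0', Int.toNat_natCast]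
      have ht1 : ((0 + (r : Int) + 1) * w).toNat = (r + 1) * W := by rw [ht1', Int.toNat_natCast]
      rw [ht0, ht1, ← List.map_drop, ← List.map_take]
      have hrW : r * W + W ≤ W * H := by
        have h1 : (r + 1) * W ≤ H * W := Nat.mul_le_mul_right W hr
        rw [Nat.add_mul, Nat.one_mul, Nat.mul_comm H W] at h1
        omega
      have hsplit : W * H = r * W + (W * H - r * W) := by omega
      rw [hsplit, List.range_add, List.drop_left' (by simp), ← List.map_take, List.take_range]
      have hmin : min ((r + 1) * W - r * W) (W * H - r * W) = W := by
        rw [Nat.add_mul, Nat.one_mul]; omega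
      rw [hmin, List.map_map]
      apply List.map_congr_left
      intro c _
      simp only [Function.comp, pvT, ← hW]
      congr 2 <;> (push_cast; ring)

-- ===== VERDICT (by name: the statement is the Claim_ definition above) =====
theorem get_image_matrix_spec : Claim_equal_get_image_matrix := by
  intro data w h_ _ hpre
  unfold Spec_get_image_matrix
  exact get_image_matrix_spec_aux data w h_ hpre
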